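-- pv_equiv track=rewrite | github.com/HarishParamathmananda97/Problem_Solving | hackerrank_daily_challenges/encryption_decryption.py | decryptPassword
-- ===== SOURCE A (Python) =====
-- def decryptPassword(s):
--     # Handle the '*'
--     parts = s.split('*')
--     reconstructed = []
--     for part in parts:
--         if len(part) > 1 and part[-2].islower() and part[-1].isupper():
--             reconstructed.append(part[:-2])
--             reconstructed.append(part[-1])
--             reconstructed.append(part[-2])
--         else:
--             reconstructed.append(part)
--     s = ''.join(reconstructed)
--
--     # Handle the digits and '0's
--     digit_stack = []
--     result = []
--     for char in s:
--         if char == '0':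
--             result.append(digit_stack.pop())
--         elif char.isdigit():
--             digit_stack.append(char)
--         else:
--             result.append(char)
--
--     return ''.join(result)
-- ===== SOURCE B (Python) =====
-- def decryptPassword(s):
--     # One pass: collect the current '*'-delimited segment in buf; at each
--     # boundary swap its trailing lower/upper pair in place, then stream the
--     # characters through one persistent digit stack, emitting as we go.
--     out = []
--     stack = []
--     buf = []
--
--     def flush():
--         if len(buf) > 1 and buf[-2].islower() and buf[-1].isupper():
--             buf[-2], buf[-1] = buf[-1], buf[-2]
--         for c in buf:
--             if c == '0':
--                 out.append(stack.pop())
--             elif c.isdigit():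
--                 stack.append(c)
--             else:
--                 out.append(c)
--         buf.clear()
--
--     for ch in s:
--         if ch == '*':
--             flush()
--         else:
--             buf.append(ch)
--     flush()
--     return ''.join(out)
-- ===== Notes on version B (the rewrite author's own statement) =====
-- stated objective: simpler
-- what changed: Replaces split('*') plus two separate full passes (swap pass building a joined intermediate string, then the digit-stack pass) by a single character loop with a segment buffer flushed at each '*' through one persistent digit stack, emitting output as it goes.
import Mathlib
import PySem

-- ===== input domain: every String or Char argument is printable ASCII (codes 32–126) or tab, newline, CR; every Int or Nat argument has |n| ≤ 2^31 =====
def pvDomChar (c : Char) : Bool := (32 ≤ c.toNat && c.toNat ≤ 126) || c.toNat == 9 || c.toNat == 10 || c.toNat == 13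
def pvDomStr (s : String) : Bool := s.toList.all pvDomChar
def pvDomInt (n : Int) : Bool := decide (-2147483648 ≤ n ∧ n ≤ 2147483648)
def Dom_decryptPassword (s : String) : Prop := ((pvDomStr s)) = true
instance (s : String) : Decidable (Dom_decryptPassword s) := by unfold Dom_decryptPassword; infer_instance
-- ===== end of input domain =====

-- B replaces split + two separate passes by one character loop with a segment
-- buffer and a persistent digit stack (objective: simpler, one pass).

-- Shared per-character rule (the identical if/elif/else chain of both Pythons):
-- on '0' pop the digit stack and emit (Python raises IndexError on an empty
-- stack — excluded by Pre_; the port leaves the state unchanged there),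
-- push other digits, emit everything else.  'result.append c' is 'out ++ [c]'.
def pvProcChar (st : List Char × List Char) (c : Char) : List Char × List Char :=
  if c = '0' then
    match st.1 with
    | [] => st
    | t :: r => (r, st.2 ++ [t])
  else if PySem.Chars.isdigit c then (c :: st.1, st.2)
  else (st.1, st.2 ++ [c])

-- ===== PORT A =====
-- the loop body of A's first pass: the three appended pieces
-- (part[:-2], part[-1], part[-2]) when the guard fires, else [part]
def pvSwapA (part : List Char) : List (List Char) :=
  if 1 < part.length then
    match PySem.List.pyGet? part (-2), PySem.List.pyGet? part (-1) with
    | some a, some b =>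
      if PySem.Chars.islower a && PySem.Chars.isupper b then
        [PySem.List.slice part none (some (-2)), [b], [a]]
      else [part]
    | _, _ => [part]
  else [part]

def decryptPassword (s : String) : String :=
  let parts := PySem.Chars.splitOn s.toList ['*']
  let reconstructed := parts.foldl (fun acc part => acc ++ pvSwapA part) []
  let s2 := reconstructed.flatten       -- ''.join(reconstructed)
  String.mk (s2.foldl pvProcChar ([], [])).2

-- ===== PORT B =====
-- B's segment buffer is kept REVERSED (cons = Python's buf.append at the end),
-- so buf[-1]/buf[-2] are the first two elements and the len(buf)>1 guard is the
-- two-cons pattern; flush swaps them in place and streams the buffer through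
-- the persistent stack/output state.
def pvFlush (st : List Char × List Char) (rbuf : List Char) : List Char × List Char :=
  let rbuf' := match rbuf with
    | b :: a :: rest =>
        if PySem.Chars.islower a && PySem.Chars.isupper b then a :: b :: rest else rbuf
    | _ => rbuf
  rbuf'.reverse.foldl pvProcChar st

def pvLoopB : List Char → List Char → (List Char × List Char) → List Char × List Char
  | [], rbuf, st => pvFlush st rbuf
  | c :: cs, rbuf, st =>
      if c = '*' then pvLoopB cs [] (pvFlush st rbuf)
      else pvLoopB cs (c :: rbuf) st

def decryptPassword_alt (s : String) : String :=
  String.mk (pvLoopB s.toList [] ([], [])).2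

-- ===== PRECONDITION & SPEC =====
-- Pre_ excludes exactly the inputs on which Python A raises IndexError: a '0'
-- reached with an empty digit stack, i.e. some prefix of s without its '*'s has
-- more '0's than nonzero digits (the swap reorders two letters only, so it
-- never changes the digit sequence).
def Pre_decryptPassword (s : String) : Prop :=
  ∀ i ≤ (s.toList.filter (fun c => c ≠ '*')).length,
    (((s.toList.filter (fun c => c ≠ '*')).take i).count '0')
      ≤ (((s.toList.filter (fun c => c ≠ '*')).take i).filter
          (fun c => PySem.Chars.isdigit c && c ≠ '0')).length
instance (s : String) : Decidable (Pre_decryptPassword s) := by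
  unfold Pre_decryptPassword; infer_instance

def pvWitness_decryptPassword : String := "51ab0*0cD"

def Spec_decryptPassword (s : String) (out : String) : Prop := out = decryptPassword_alt s
instance (s : String) (out : String) : Decidable (Spec_decryptPassword s out) := by unfold Spec_decryptPassword; infer_instance

-- ===== CLAIM (what is proved, stated in full; the proofs are below) =====
def Claim_equal_decryptPassword : Prop := ∀ (s : String), Dom_decryptPassword s → Pre_decryptPassword s → Spec_decryptPassword s (decryptPassword s)

-- ===== LEMMAS AND PROOFS =====

-- reference split on '*' (proved equal both to PySem's splitOn and to B's loop)
def pvConsFirst (pre : List Char) : List (List Char) → List (List Char)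
  | [] => [pre]
  | p :: ps => (pre ++ p) :: ps

def pvSplit : List Char → List (List Char)
  | [] => [[]]
  | c :: cs => if c = '*' then [] :: pvSplit cs else pvConsFirst [c] (pvSplit cs)

theorem pvSplit_ne_nil (l : List Char) : pvSplit l ≠ [] := by
  cases l with
  | nil => simp [pvSplit]
  | cons c cs =>
    simp only [pvSplit]
    split
    · simp
    · cases h : pvSplit cs <;> simp [pvConsFirst]

theorem pvConsFirst_nil (l : List (List Char)) (h : l ≠ []) : pvConsFirst [] l = l := by
  cases l with
  | nil => exact absurd rfl h
  | cons p ps => simp [pvConsFirst]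

theorem pvConsFirst_consFirst (x y : List Char) (l : List (List Char)) :
    pvConsFirst x (pvConsFirst y l) = pvConsFirst (x ++ y) l := by
  cases l <;> simp [pvConsFirst]

theorem go_eq_pvSplit : ∀ (fuel : Nat) (l cur : List Char) (acc : List (List Char)),
    l.length < fuel →
    PySem.Chars.splitOn.go ['*'] fuel l cur acc
      = acc.reverse ++ pvConsFirst cur.reverse (pvSplit l) := by
  intro fuel
  induction fuel with
  | zero => intro l cur acc h; omega
  | succ n ih =>
    intro l cur acc h
    cases l with
    | nil =>
      simp [PySem.Chars.splitOn.go, pvSplit, pvConsFirst]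
    | cons c cs =>
      rw [PySem.Chars.splitOn.go]
      by_cases hc : c = '*'
      · subst hc
        have hp : List.isPrefixOf ['*'] ('*' :: cs) = true := by
          simp [List.isPrefixOf]
        simp only [hp, if_pos]
        have hd : List.drop ['*'].length ('*' :: cs) = cs := rfl
        rw [hd, ih _ _ _ (by simpa using Nat.lt_of_succ_lt_succ h), List.reverse_nil,
          pvConsFirst_nil _ (pvSplit_ne_nil cs)]
        simp [pvSplit, pvConsFirst]
      · have hp : List.isPrefixOf ['*'] (c :: cs) = false := by
          simp [List.isPrefixOf]
          exact fun hh => hc hh.symm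
        simp only [hp, if_neg, Bool.false_eq_true, not_false_iff]
        rw [ih]
        · simp only [pvSplit, if_neg hc, List.reverse_cons]
          rw [pvConsFirst_consFirst]
        · simpa using Nat.lt_of_succ_lt_succ h

theorem splitOn_eq_pvSplit (l : List Char) :
    PySem.Chars.splitOn l ['*'] = pvSplit l := by
  unfold PySem.Chars.splitOn
  rw [go_eq_pvSplit _ _ _ _ (by omega)]
  simp [pvConsFirst_nil _ (pvSplit_ne_nil l)]

-- processing a whole list of parts (A's composite, B's target)
def pvRun (parts : List (List Char)) (st : List Char × List Char) : List Char × List Char :=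
  parts.foldl (fun st p => ((pvSwapA p).flatten).foldl pvProcChar st) st

theorem pvRun_cons (p : List Char) (ps : List (List Char)) (st : List Char × List Char) :
    pvRun (p :: ps) st = pvRun ps (((pvSwapA p).flatten).foldl pvProcChar st) := by
  simp [pvRun]

-- pyGet?/slice on a list ending in two known elements
theorem pyGet?_append_pair_neg2 (q : List Char) (a b : Char) :
    PySem.List.pyGet? (q ++ [a, b]) (-2) = some a := by
  simp [PySem.List.pyGet?, PySem.List.pyIdx?]

theorem pyGet?_append_pair_neg1 (q : List Char) (a b : Char) :
    PySem.List.pyGet? (q ++ [a, b]) (-1) = some b := by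
  simp [PySem.List.pyGet?, PySem.List.pyIdx?]

theorem slice_append_pair_neg2 (q : List Char) (a b : Char) :
    PySem.List.slice (q ++ [a, b]) none (some (-2)) = q := by
  rw [PySem.List.slice_to_neg_ofNat (q ++ [a, b]) 2 (by omega)]
  simp

-- B's flush is A's per-part step (on the un-reversed buffer)
theorem pvFlush_eq (st : List Char × List Char) (rbuf : List Char) :
    pvFlush st rbuf = ((pvSwapA rbuf.reverse).flatten).foldl pvProcChar st := by
  match rbuf with
  | [] => simp [pvFlush, pvSwapA]
  | [a] => simp [pvFlush, pvSwapA]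
  | b :: a :: rest =>
    have hrev : (b :: a :: rest).reverse = rest.reverse ++ [a, b] := by simp
    have h1 : pvSwapA (rest.reverse ++ [a, b])
        = if PySem.Chars.islower a && PySem.Chars.isupper b then
            [rest.reverse, [b], [a]] else [rest.reverse ++ [a, b]] := by
      rw [pvSwapA, if_pos (by simp), pyGet?_append_pair_neg2,
        pyGet?_append_pair_neg1, slice_append_pair_neg2]
    rw [hrev, h1]
    by_cases hg : (PySem.Chars.islower a && PySem.Chars.isupper b) = true
    · simp [pvFlush, hg]
    · simp [pvFlush, hg]

-- main loop invariant for B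
theorem pvLoopB_eq : ∀ (cs rbuf : List Char) (st : List Char × List Char),
    pvLoopB cs rbuf st = pvRun (pvConsFirst rbuf.reverse (pvSplit cs)) st := by
  intro cs
  induction cs with
  | nil =>
    intro rbuf st
    simp [pvLoopB, pvSplit, pvConsFirst, pvRun, pvFlush_eq]
  | cons c cs ih =>
    intro rbuf st
    by_cases hc : c = '*'
    · subst hc
      rw [show pvLoopB ('*' :: cs) rbuf st = pvLoopB cs [] (pvFlush st rbuf) from by
            simp [pvLoopB],
          ih, show pvSplit ('*' :: cs) = [] :: pvSplit cs from by simp [pvSplit],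
          show pvConsFirst rbuf.reverse ([] :: pvSplit cs)
              = rbuf.reverse :: pvSplit cs from by simp [pvConsFirst],
          pvRun_cons, ← pvFlush_eq]
      simp [pvConsFirst_nil _ (pvSplit_ne_nil cs)]
    · rw [show pvLoopB (c :: cs) rbuf st = pvLoopB cs (c :: rbuf) st from by
            simp [pvLoopB, hc],
          ih, show pvSplit (c :: cs) = pvConsFirst [c] (pvSplit cs) from by
            simp [pvSplit, hc],
          pvConsFirst_consFirst]
      simp

theorem flatMap_swap_foldl : ∀ (parts : List (List Char)) (st : List Char × List Char),
    ((parts.flatMap pvSwapA).flatten).foldl pvProcChar st = pvRun parts st := by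
  intro parts
  induction parts with
  | nil => intro st; simp [pvRun]
  | cons p ps ih =>
    intro st
    simp only [List.flatMap_cons, List.flatten_append, List.foldl_append, ih, pvRun_cons]

theorem decryptPassword_eq_pvRun (s : String) :
    decryptPassword s = String.mk ((pvRun (pvSplit s.toList) ([], [])).2) := by
  unfold decryptPassword
  dsimp only
  rw [splitOn_eq_pvSplit]
  congr 1
  rw [PySem.List.foldl_append_eq_flatMap, List.nil_append, flatMap_swap_foldl]

-- ===== VERDICT (by name: the statement is the Claim_ definition above) =====
theorem decryptPassword_spec : Claim_equal_decryptPassword := by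
  intro s _ _
  unfold Spec_decryptPassword decryptPassword_alt
  rw [pvLoopB_eq, decryptPassword_eq_pvRun]
  simp [pvConsFirst_nil _ (pvSplit_ne_nil s.toList)]
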